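-- pv_equiv track=rewrite | github.com/couloum/aoc | 2025/03/part1.py | get_highest_num
-- ===== SOURCE A (Python) =====
-- def get_highest_num(string):
--     """
--     From a string containing digits only, get the value and position of first highest digit
--     """
--
--
--     max_num = -1
--     max_num_pos = -1
--     for i in range(9, 1, -1):
--         try:
--             max_num_pos = string.index(f"{i}")
--             max_num = i
--             break
--         except ValueError:
--             continue
--
--     return (max_num, max_num_pos)
-- ===== SOURCE B (Python) =====
-- def get_highest_num(string):
--     """
--     From a string containing digits only, get the value and position of first highest digit
--     """
--     max_num = -1
--     max_num_pos = -1
--     for i, c in enumerate(string):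
--         if '2' <= c <= '9':
--             v = int(c)
--             if max_num < v:
--                 max_num = v
--                 max_num_pos = i
--     return (max_num, max_num_pos)
-- ===== Notes on version B (the rewrite author's own statement) =====
-- stated objective: simpler
-- what changed: Replaces A's eight descending str.index probes (each a fresh substring scan) with one left-to-right pass that keeps the best digit 2-9 seen so far, updating only on strictly greater digits so the first occurrence of the maximum is kept.
import Mathlib
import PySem

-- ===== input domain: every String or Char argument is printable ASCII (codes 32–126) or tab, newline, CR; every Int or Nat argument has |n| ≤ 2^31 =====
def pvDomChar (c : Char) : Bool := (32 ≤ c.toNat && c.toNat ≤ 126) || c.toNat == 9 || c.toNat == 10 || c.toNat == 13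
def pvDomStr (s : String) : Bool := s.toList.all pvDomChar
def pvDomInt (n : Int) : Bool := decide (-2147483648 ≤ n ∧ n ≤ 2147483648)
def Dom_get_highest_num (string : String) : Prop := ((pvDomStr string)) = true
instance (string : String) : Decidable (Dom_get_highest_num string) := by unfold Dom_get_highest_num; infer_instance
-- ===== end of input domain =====

-- B replaces A's eight descending str.index probes with one strictly-greater-update pass over the characters; objective: simpler.

-- ===== PORT A =====
-- the for-loop over range(9, 1, -1) with try string.index / except ValueError continue / break:
-- str.index succeeds exactly when str.find ≠ -1, and then returns the same value.
def pvALoop (s : String) : List Int → Int × Int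
  | [] => (-1, -1)
  | i :: rest =>
    let j := PySem.Str.find s (PySem.Int.toStr i)
    if j = -1 then pvALoop s rest else (i, j)

def get_highest_num (string : String) : Int × Int :=
  pvALoop string (PySem.List.pyRange 9 1 (-1))

-- ===== PORT B =====
def get_highest_num_alt (string : String) : Int × Int :=
  (PySem.List.enumerate string.toList 0).foldl
    (fun acc ic =>
      if '2' ≤ ic.2 ∧ ic.2 ≤ '9' then
        let v : Int := (ic.2.toNat : Int) - 48
        if acc.1 < v then (v, ic.1) else acc
      else acc)
    (-1, -1)

-- ===== PRECONDITION & SPEC =====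
def Spec_get_highest_num (string : String) (out : Int × Int) : Prop := out = get_highest_num_alt string
instance (string : String) (out : Int × Int) : Decidable (Spec_get_highest_num string out) := by unfold Spec_get_highest_num; infer_instance

-- ===== CLAIM (what is proved, stated in full; the proofs are below) =====
def Claim_equal_get_highest_num : Prop := ∀ (string : String), Dom_get_highest_num string → Spec_get_highest_num string (get_highest_num string)

-- ===== LEMMAS AND PROOFS =====

-- canonical recursive description: (max digit 2..9 in l, index of its first occurrence), (-1,-1) if none
def pvCanon : List Char → Int × Int
  | [] => (-1, -1)
  | c :: t =>
    let r := pvCanon t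
    if '2' ≤ c ∧ c ≤ '9' ∧ r.1 ≤ (c.toNat : Int) - 48 then ((c.toNat : Int) - 48, 0)
    else (r.1, if r.2 = -1 then -1 else r.2 + 1)

def pvDChr (d : Int) : Char := Char.ofNat (d.toNat + 48)

lemma pvChar_le_iff (a b : Char) : a ≤ b ↔ a.toNat ≤ b.toNat := Iff.rfl

lemma pvDigit_iff (c : Char) : ('2' ≤ c ∧ c ≤ '9') ↔ (50 ≤ c.toNat ∧ c.toNat ≤ 57) := by
  simp only [pvChar_le_iff, show '2'.toNat = 50 from rfl, show '9'.toNat = 57 from rfl]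

lemma pvCanon_cons_pos (c : Char) (t : List Char)
    (h : '2' ≤ c ∧ c ≤ '9' ∧ (pvCanon t).1 ≤ (c.toNat : Int) - 48) :
    pvCanon (c :: t) = ((c.toNat : Int) - 48, 0) := by
  simp only [pvCanon]; rw [if_pos h]

lemma pvCanon_cons_neg (c : Char) (t : List Char)
    (h : ¬('2' ≤ c ∧ c ≤ '9' ∧ (pvCanon t).1 ≤ (c.toNat : Int) - 48)) :
    pvCanon (c :: t) = ((pvCanon t).1, if (pvCanon t).2 = -1 then -1 else (pvCanon t).2 + 1) := by
  simp only [pvCanon]; rw [if_neg h]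

lemma pvCanon_shape (l : List Char) :
    ((pvCanon l).1 = -1 ∧ (pvCanon l).2 = -1) ∨
    (2 ≤ (pvCanon l).1 ∧ (pvCanon l).1 ≤ 9 ∧ 0 ≤ (pvCanon l).2) := by
  induction l with
  | nil => left; exact ⟨rfl, rfl⟩
  | cons c t ih =>
    by_cases h : '2' ≤ c ∧ c ≤ '9' ∧ (pvCanon t).1 ≤ (c.toNat : Int) - 48
    · rw [pvCanon_cons_pos c t h]
      obtain ⟨hb, _⟩ := (pvDigit_iff c).mp ⟨h.1, h.2.1⟩
      have hb' := ((pvDigit_iff c).mp ⟨h.1, h.2.1⟩).2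
      right; dsimp only; omega
    · rw [pvCanon_cons_neg c t h]
      rcases ih with ⟨h1, h2⟩ | ⟨h1, h2, h3⟩
      · left; dsimp only; rw [if_pos h2]; exact ⟨h1, rfl⟩
      · right; dsimp only
        rw [if_neg (by omega)]
        exact ⟨h1, h2, by omega⟩

lemma pvCanon_max (l : List Char) (c : Char) (hc : c ∈ l) (h2 : '2' ≤ c) (h9 : c ≤ '9') :
    (c.toNat : Int) - 48 ≤ (pvCanon l).1 := by
  induction l with
  | nil => simp at hc
  | cons d t ih =>
    by_cases h : '2' ≤ d ∧ d ≤ '9' ∧ (pvCanon t).1 ≤ (d.toNat : Int) - 48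
    · rw [pvCanon_cons_pos d t h]; dsimp only
      rcases List.mem_cons.mp hc with rfl | hmem
      · omega
      · exact le_trans (ih hmem) h.2.2
    · rw [pvCanon_cons_neg d t h]; dsimp only
      rcases List.mem_cons.mp hc with rfl | hmem
      · by_contra hq
        exact h ⟨h2, h9, by omega⟩
      · exact ih hmem

lemma pvDChr_of_digit (c : Char) (h2 : '2' ≤ c) (h9 : c ≤ '9') :
    pvDChr ((c.toNat : Int) - 48) = c := by
  obtain ⟨ha, hb⟩ := (pvDigit_iff c).mp ⟨h2, h9⟩
  have : ((c.toNat : Int) - 48).toNat + 48 = c.toNat := by omega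
  rw [pvDChr, this]
  exact Char.ofNat_toNat c

lemma pvDChr_toNat (d : Int) (h2 : 2 ≤ d) (h9 : d ≤ 9) : (pvDChr d).toNat = d.toNat + 48 := by
  rw [pvDChr, Char.toNat_ofNat, if_pos]
  exact Or.inl (by omega)

lemma pvDChr_digit (d : Int) (h2 : 2 ≤ d) (h9 : d ≤ 9) : '2' ≤ pvDChr d ∧ pvDChr d ≤ '9' := by
  rw [pvDigit_iff, pvDChr_toNat d h2 h9]
  omega

lemma pvCanon_mem (l : List Char) (h : 2 ≤ (pvCanon l).1) : pvDChr (pvCanon l).1 ∈ l := by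
  induction l with
  | nil => simp [pvCanon] at h
  | cons c t ih =>
    by_cases hc : '2' ≤ c ∧ c ≤ '9' ∧ (pvCanon t).1 ≤ (c.toNat : Int) - 48
    · rw [pvCanon_cons_pos c t hc]; dsimp only
      rw [pvDChr_of_digit c hc.1 hc.2.1]
      exact List.mem_cons_self
    · rw [pvCanon_cons_neg c t hc] at h ⊢; dsimp only at h ⊢
      exact List.mem_cons_of_mem _ (ih h)

lemma pvIdxOf_min (l : List Char) (c : Char) (j : Nat) (hj : j < List.idxOf c l) :
    l[j]? ≠ some c := by
  induction l generalizing j with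
  | nil => simp
  | cons d t ih =>
    rw [List.idxOf_cons] at hj
    by_cases hd : d = c
    · simp [hd] at hj
    · have hne : (d == c) = false := by simp [hd]
      rw [hne] at hj
      simp only [cond_false] at hj
      cases j with
      | zero => simp [hd]
      | succ j' =>
        simp only [List.getElem?_cons_succ]
        exact ih j' (by omega)

-- PySem.Chars.find on a single character equals idxOf (first occurrence), -1 if absent
lemma pvFind_single (l : List Char) (c : Char) :
    PySem.Chars.find l [c] = if c ∈ l then (List.idxOf c l : Int) else -1 := by
  by_cases hm : c ∈ l
  · simp only [hm, if_true]
    have hinf : [c] <:+: l := (List.singleton_infix_iff c l).mpr hm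
    have h0 : 0 ≤ PySem.Chars.find l [c] := (PySem.Chars.find_nonneg_iff l [c]).mpr hinf
    obtain ⟨hpre, hmin⟩ := PySem.Chars.find_spec h0
    set k := (PySem.Chars.find l [c]).toNat with hk
    have hget : l[k]? = some c := by
      obtain ⟨t, ht⟩ := hpre
      rw [← List.head?_drop, ← ht]
      rfl
    have hkl : k < l.length := by
      by_contra hkl
      rw [List.getElem?_eq_none (by omega)] at hget
      simp at hget
    have hil : List.idxOf c l < l.length := List.idxOf_lt_length_of_mem hm
    have h1 : List.idxOf c l ≤ k := by
      by_contra hlt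
      exact pvIdxOf_min l c k (by omega) hget
    have h2 : k ≤ List.idxOf c l := by
      by_contra hlt
      apply hmin (List.idxOf c l) (by omega)
      refine ⟨l.drop (List.idxOf c l + 1), ?_⟩
      have hh : l[List.idxOf c l]? = some c := by
        rw [List.getElem?_eq_getElem hil, List.getElem_idxOf hil]
      rw [← List.head?_drop] at hh
      cases hd : l.drop (List.idxOf c l) with
      | nil => rw [hd] at hh; simp at hh
      | cons x xs =>
        rw [hd] at hh
        simp only [List.head?_cons, Option.some.injEq] at hh
        have hxs : xs = l.drop (List.idxOf c l + 1) := by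
          have h3 := congrArg (List.drop 1) hd
          simpa [List.drop_drop] using h3.symm
        rw [hh, hxs]
        simp
    omega
  · simp only [hm, if_false]
    rw [PySem.Chars.find_eq_neg_one_iff]
    intro hinf
    exact hm ((List.singleton_infix_iff c l).mp hinf)

lemma pvCanon_pos (l : List Char) (h : 2 ≤ (pvCanon l).1) :
    (pvCanon l).2 = (List.idxOf (pvDChr (pvCanon l).1) l : Int) := by
  induction l with
  | nil => simp [pvCanon] at h
  | cons c t ih =>
    by_cases hc : '2' ≤ c ∧ c ≤ '9' ∧ (pvCanon t).1 ≤ (c.toNat : Int) - 48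
    · rw [pvCanon_cons_pos c t hc]; dsimp only
      rw [pvDChr_of_digit c hc.1 hc.2.1, List.idxOf_cons_self]
      simp
    · rw [pvCanon_cons_neg c t hc] at h ⊢; dsimp only at h ⊢
      have hmem := pvCanon_mem t h
      have hpos := ih h
      have h9' : (pvCanon t).1 ≤ 9 := by
        rcases pvCanon_shape t with ⟨h0, _⟩ | ⟨_, hh, _⟩
        · omega
        · exact hh
      have hp0 : 0 ≤ (pvCanon t).2 := by
        rcases pvCanon_shape t with ⟨h0, _⟩ | ⟨_, _, hh⟩
        · omega
        · exact hh
      have hne : c ≠ pvDChr (pvCanon t).1 := by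
        intro hceq
        apply hc
        obtain ⟨hd2, hd9⟩ := pvDChr_digit (pvCanon t).1 h h9'
        rw [hceq]
        refine ⟨hd2, hd9, ?_⟩
        rw [pvDChr_toNat _ h h9']
        omega
      rw [List.idxOf_cons]
      have hbe : (c == pvDChr (pvCanon t).1) = false := by simp [hne]
      rw [hbe]
      simp only [cond_false]
      rw [if_neg (by omega), hpos]
      push_cast
      ring

-- ===== A side =====
lemma pvToStr_digit (d : Int) (h2 : 2 ≤ d) (h9 : d ≤ 9) :
    (PySem.Int.toStr d).toList = [pvDChr d] := by
  interval_cases d <;> decide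

lemma pvALoop_spec (ds : List Int) (s : String)
    (hds : ∀ d ∈ ds, 2 ≤ d ∧ d ≤ 9)
    (hdesc : ds.Pairwise (· > ·))
    (hmem : 2 ≤ (pvCanon s.toList).1 → (pvCanon s.toList).1 ∈ ds) :
    pvALoop s ds = pvCanon s.toList := by
  induction ds with
  | nil =>
    rcases pvCanon_shape s.toList with ⟨h1, h2⟩ | ⟨h2, _, _⟩
    · rw [pvALoop, Prod.ext_iff]; exact ⟨h1.symm, h2.symm⟩
    · exact absurd (hmem h2) (by simp)
  | cons d rest ih =>
    have hd := hds d (by simp)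
    rw [pvALoop]
    simp only [PySem.Str.find_eq]
    rw [pvToStr_digit d hd.1 hd.2, pvFind_single]
    by_cases hin : pvDChr d ∈ s.toList
    · -- d is present, so d ≤ max; every earlier-tried digit is larger and absent, so max = d
      have hmax : d ≤ (pvCanon s.toList).1 := by
        have hq := pvCanon_max s.toList (pvDChr d) hin (pvDChr_digit d hd.1 hd.2).1
          (pvDChr_digit d hd.1 hd.2).2
        rw [pvDChr_toNat d hd.1 hd.2] at hq
        omega
      have hM2 : 2 ≤ (pvCanon s.toList).1 := le_trans hd.1 hmax
      have heq : (pvCanon s.toList).1 = d := by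
        rcases List.mem_cons.mp (hmem hM2) with h | h
        · omega
        · have := (List.pairwise_cons.mp hdesc).1 _ h
          omega
      rw [if_pos hin, if_neg (by omega)]
      have hps := pvCanon_pos s.toList hM2
      rw [heq] at hps
      rw [Prod.ext_iff]
      exact ⟨heq.symm, hps.symm⟩
    · rw [if_neg hin, if_pos rfl]
      apply ih (fun x hx => hds x (List.mem_cons_of_mem _ hx)) (List.pairwise_cons.mp hdesc).2
      intro hM2
      rcases List.mem_cons.mp (hmem hM2) with h | h
      · exfalso
        apply hin
        rw [← h]
        exact pvCanon_mem s.toList hM2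
      · exact h

-- ===== B side =====
lemma pvFoldB_inv (l : List Char) (k m p : Int) (hm : -1 ≤ m) :
    (PySem.List.enumerate l k).foldl
      (fun acc ic =>
        if '2' ≤ ic.2 ∧ ic.2 ≤ '9' then
          let v : Int := (ic.2.toNat : Int) - 48
          if acc.1 < v then (v, ic.1) else acc
        else acc)
      (m, p)
      = if m < (pvCanon l).1 then ((pvCanon l).1, k + (pvCanon l).2) else (m, p) := by
  induction l generalizing k m p with
  | nil =>
    simp only [PySem.List.enumerate_nil, List.foldl_nil, pvCanon]
    rw [if_neg (by omega)]
  | cons c t ih =>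
    rw [PySem.List.enumerate_cons, List.foldl_cons]
    dsimp only
    have hp0 : 0 ≤ (pvCanon t).1 → 0 ≤ (pvCanon t).2 := by
      intro hq
      rcases pvCanon_shape t with ⟨h0, _⟩ | ⟨_, _, hh⟩
      · omega
      · exact hh
    by_cases hdig : '2' ≤ c ∧ c ≤ '9'
    · obtain ⟨hb1, hb2⟩ := (pvDigit_iff c).mp hdig
      rw [if_pos hdig]
      by_cases hlt : m < (c.toNat : Int) - 48
      · rw [if_pos hlt, ih (k + 1) _ _ (by omega)]
        by_cases hmt : (c.toNat : Int) - 48 < (pvCanon t).1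
        · have hpt := hp0 (by omega)
          rw [pvCanon_cons_neg c t (fun hcc => absurd hcc.2.2 (by omega))]
          rw [if_neg (show ¬((pvCanon t).2 = -1) from by omega)]
          rw [if_pos hmt]
          rw [if_pos (show m < ((pvCanon t).1, (pvCanon t).2 + 1).1 from by omega)]
          refine Prod.ext rfl ?_
          show k + 1 + (pvCanon t).2 = k + ((pvCanon t).2 + 1)
          ring
        · rw [pvCanon_cons_pos c t ⟨hdig.1, hdig.2, by omega⟩]
          rw [if_neg hmt]
          rw [if_pos (show m < (((c.toNat : Int) - 48, (0:Int))).1 from hlt)]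
          refine Prod.ext rfl ?_
          show (k : Int) = k + 0
          ring
      · rw [if_neg hlt, ih (k + 1) _ _ hm]
        by_cases hmt : m < (pvCanon t).1
        · have hpt := hp0 (by omega)
          rw [pvCanon_cons_neg c t (fun hcc => absurd hcc.2.2 (by omega))]
          rw [if_neg (show ¬((pvCanon t).2 = -1) from by omega)]
          rw [if_pos hmt]
          rw [if_pos (show m < ((pvCanon t).1, (pvCanon t).2 + 1).1 from hmt)]
          refine Prod.ext rfl ?_
          show k + 1 + (pvCanon t).2 = k + ((pvCanon t).2 + 1)
          ring
        · rw [if_neg hmt]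
          by_cases hck : (pvCanon t).1 ≤ (c.toNat : Int) - 48
          · rw [pvCanon_cons_pos c t ⟨hdig.1, hdig.2, hck⟩]
            rw [if_neg (show ¬(m < (((c.toNat : Int) - 48, (0:Int))).1) from by omega)]
          · rw [pvCanon_cons_neg c t (fun hcc => absurd hcc.2.2 (by omega))]
            rw [if_neg (show ¬(m < ((pvCanon t).1,
              if (pvCanon t).2 = -1 then (-1:Int) else (pvCanon t).2 + 1).1) from by omega)]
    · rw [if_neg hdig, ih (k + 1) _ _ hm]
      rw [pvCanon_cons_neg c t (fun hcc => hdig ⟨hcc.1, hcc.2.1⟩)]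
      by_cases hmt : m < (pvCanon t).1
      · have hpt := hp0 (by omega)
        rw [if_neg (show ¬((pvCanon t).2 = -1) from by omega)]
        rw [if_pos hmt]
        rw [if_pos (show m < ((pvCanon t).1, (pvCanon t).2 + 1).1 from hmt)]
        refine Prod.ext rfl ?_
        show k + 1 + (pvCanon t).2 = k + ((pvCanon t).2 + 1)
        ring
      · rw [if_neg hmt]
        rw [if_neg (show ¬(m < ((pvCanon t).1,
          if (pvCanon t).2 = -1 then (-1:Int) else (pvCanon t).2 + 1).1) from hmt)]

lemma pvB_eq_canon (s : String) : get_highest_num_alt s = pvCanon s.toList := by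
  rw [get_highest_num_alt, pvFoldB_inv s.toList 0 (-1) (-1) (by norm_num)]
  rcases pvCanon_shape s.toList with ⟨h1, h2⟩ | ⟨h2, _, hp⟩
  · rw [if_neg (by omega), Prod.ext_iff]
    exact ⟨h1.symm, h2.symm⟩
  · rw [if_pos (by omega), Prod.ext_iff]
    exact ⟨rfl, by omega⟩

lemma pvA_eq_canon (s : String) : get_highest_num s = pvCanon s.toList := by
  rw [get_highest_num]
  have hrange : PySem.List.pyRange 9 1 (-1) = [9, 8, 7, 6, 5, 4, 3, 2] := by decide
  rw [hrange]
  apply pvALoop_spec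
  · intro d hd
    fin_cases hd <;> norm_num
  · decide
  · intro h2
    have h9 : (pvCanon s.toList).1 ≤ 9 := by
      rcases pvCanon_shape s.toList with ⟨h0, _⟩ | ⟨_, hh, _⟩
      · omega
      · exact hh
    have hcase : (pvCanon s.toList).1 = 2 ∨ (pvCanon s.toList).1 = 3 ∨ (pvCanon s.toList).1 = 4 ∨
        (pvCanon s.toList).1 = 5 ∨ (pvCanon s.toList).1 = 6 ∨ (pvCanon s.toList).1 = 7 ∨
        (pvCanon s.toList).1 = 8 ∨ (pvCanon s.toList).1 = 9 := by omega
    rcases hcase with h | h | h | h | h | h | h | h <;> rw [h] <;> simp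

-- ===== VERDICT (by name: the statement is the Claim_ definition above) =====
theorem get_highest_num_spec : Claim_equal_get_highest_num := by
  intro s _
  unfold Spec_get_highest_num
  rw [pvA_eq_canon, pvB_eq_canon]
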